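-- pv_equiv track=rewrite | github.com/aminehd/algo-patterns | codeVisDebunk/codevisdebunk/terminal_animation.py | create_bouncing_ball
-- ===== SOURCE A (Python) =====
-- def create_bouncing_ball(width=20, height=10, frames=10):
--     """Create a bouncing ball animation."""
--     animations = []
--
--     # Ball position and direction
--     x, y = width // 2, 0
--     dx, dy = 1, 1
--
--     for _ in range(frames):
--         # Create empty frame
--         frame = [[0 for _ in range(width)] for _ in range(height)]
--
--         # Update ball position
--         x += dx
--         y += dy
--
--         # Bounce off walls
--         if x <= 0 or x >= width - 1:
--             dx = -dx
--         if y <= 0 or y >= height - 1: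
--             dy = -dy
--
--         # Keep ball in bounds
--         x = max(0, min(width - 1, x))
--         y = max(0, min(height - 1, y))
--
--         # Draw ball
--         frame[y][x] = 5  # Ball
--
--         animations.append(frame)
--
--     return animations
-- ===== SOURCE B (Python) =====
-- def create_bouncing_ball(width=20, height=10, frames=10):
--     """Closed-form bouncing ball: each coordinate is a triangle wave, no state."""
--     def tri(start, t, span):
--         if span <= 0:
--             return 0
--         m = (start + t) % (2 * span)
--         return m if m <= span else 2 * span - m
--     sx = min(width // 2, width - 2)
--     return [
--         [
--             [5 if (r == tri(0, t, height - 1) and c == tri(sx, t, width - 1)) else 0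
--              for c in range(width)]
--             for r in range(height)
--         ]
--         for t in range(1, frames + 1)
--     ]
-- ===== Notes on version B (the rewrite author's own statement) =====
-- stated objective: alternative
-- what changed: Replaces A's stateful step-by-step bounce simulation (carrying x, y, dx, dy and mutating a zero grid) by a closed-form triangle-wave formula giving each coordinate per frame directly, building every grid cell by a comprehension.
import Mathlib
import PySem

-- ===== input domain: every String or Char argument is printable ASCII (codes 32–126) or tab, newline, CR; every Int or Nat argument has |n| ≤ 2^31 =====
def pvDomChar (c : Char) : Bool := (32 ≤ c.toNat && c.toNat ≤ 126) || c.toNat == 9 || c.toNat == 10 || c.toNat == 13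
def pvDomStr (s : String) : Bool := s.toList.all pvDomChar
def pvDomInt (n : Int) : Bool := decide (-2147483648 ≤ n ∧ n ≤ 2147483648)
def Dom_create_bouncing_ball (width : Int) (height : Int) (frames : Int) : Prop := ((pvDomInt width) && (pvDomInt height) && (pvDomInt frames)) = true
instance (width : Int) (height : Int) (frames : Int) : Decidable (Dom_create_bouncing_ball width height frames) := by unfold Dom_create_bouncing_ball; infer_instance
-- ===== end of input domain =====

-- B replaces A's step-by-step ball simulation by a closed-form triangle-wave
-- position per frame (alternative decomposition; no speed claim).

-- ===== PORT A =====
-- A-side helper: the body of A's 'for _ in range(frames)' loop, acting on the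
-- state (animations, x, y, dx, dy); a literal transliteration of A's loop body.
def stepA (width : Int) (height : Int)
    (st : List (List (List Int)) × Int × Int × Int × Int) :
    List (List (List Int)) × Int × Int × Int × Int :=
  match st with
  | (animations, x, y, dx, dy) =>
    -- frame = [[0 for _ in range(width)] for _ in range(height)]
    let frame : List (List Int) :=
      (PySem.List.pyRange 0 height 1).map (fun _ =>
        (PySem.List.pyRange 0 width 1).map (fun _ => (0 : Int)))
    let x := x + dx
    let y := y + dy
    let dx := if x ≤ 0 ∨ x ≥ width - 1 then -dx else dx
    let dy := if y ≤ 0 ∨ y ≥ height - 1 then -dy else dy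
    let x := max 0 (min (width - 1) x)
    let y := max 0 (min (height - 1) y)
    -- frame[y][x] = 5  (x, y ≥ 0 after the clamp; in range under Pre_)
    let frame := PySem.List.pySetD frame y
      (PySem.List.pySetD (PySem.List.pyGetD frame y []) x 5)
    (animations ++ [frame], x, y, dx, dy)

def create_bouncing_ball (width : Int) (height : Int) (frames : Int) : List (List (List Int)) :=
  ((PySem.List.pyRange 0 frames 1).foldl (fun st _ => stepA width height st)
    ([], PySem.Int.floordiv width 2, 0, 1, 1)).1

-- ===== PORT B =====
-- B-side helper: triangle wave (Source B's 'tri')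
def triB (start : Int) (t : Int) (span : Int) : Int :=
  if span ≤ 0 then 0
  else
    let m := PySem.Int.mod (start + t) (2 * span)
    if m ≤ span then m else 2 * span - m

def create_bouncing_ball_alt (width : Int) (height : Int) (frames : Int) : List (List (List Int)) :=
  let sx := min (PySem.Int.floordiv width 2) (width - 2)
  (PySem.List.pyRange 1 (frames + 1) 1).map (fun t =>
    (PySem.List.pyRange 0 height 1).map (fun r =>
      (PySem.List.pyRange 0 width 1).map (fun c =>
        if r = triB 0 t (height - 1) ∧ c = triB sx t (width - 1) then 5 else 0)))

-- ===== PRECONDITION & SPEC =====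
-- Pre_ excludes width ≤ 0 or height ≤ 0 with frames ≥ 1, on which A raises
-- IndexError at 'frame[y][x] = 5' (the frame has no cell to draw into).
def Pre_create_bouncing_ball (width : Int) (height : Int) (frames : Int) : Prop :=
  frames ≤ 0 ∨ (1 ≤ width ∧ 1 ≤ height)
instance (width : Int) (height : Int) (frames : Int) : Decidable (Pre_create_bouncing_ball width height frames) := by unfold Pre_create_bouncing_ball; infer_instance

def pvWitness_create_bouncing_ball : Int × Int × Int := (5, 4, 6)

def Spec_create_bouncing_ball (width : Int) (height : Int) (frames : Int) (out : List (List (List Int))) : Prop := out = create_bouncing_ball_alt width height frames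
instance (width : Int) (height : Int) (frames : Int) (out : List (List (List Int))) : Decidable (Spec_create_bouncing_ball width height frames out) := by unfold Spec_create_bouncing_ball; infer_instance

-- ===== CLAIM (what is proved, stated in full; the proofs are below) =====
def Claim_equal_create_bouncing_ball : Prop := ∀ (width : Int) (height : Int) (frames : Int), Dom_create_bouncing_ball width height frames → Pre_create_bouncing_ball width height frames → Spec_create_bouncing_ball width height frames (create_bouncing_ball width height frames)

-- ===== LEMMAS AND PROOFS =====

def axStep (span : Int) (p : Int) (d : Int) : Int × Int :=
  let p := p + d
  let d := if p ≤ 0 ∨ p ≥ span then -d else d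
  (max 0 (min span p), d)

def dirF (span : Int) (s : Int) (t : Int) : Int :=
  if span ≤ 0 then (if t % 2 = 0 then 1 else -1)
  else if span ≤ PySem.Int.mod (s + t) (2 * span) then -1 else 1

def gridB (width : Int) (height : Int) (sx : Int) (t : Int) : List (List Int) :=
  (PySem.List.pyRange 0 height 1).map (fun r =>
    (PySem.List.pyRange 0 width 1).map (fun c =>
      if r = triB 0 t (height - 1) ∧ c = triB sx t (width - 1) then 5 else 0))

def mkFrameA (width : Int) (height : Int) (xv : Int) (yv : Int) : List (List Int) :=
  let frame : List (List Int) :=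
    (PySem.List.pyRange 0 height 1).map (fun _ =>
      (PySem.List.pyRange 0 width 1).map (fun _ => (0 : Int)))
  PySem.List.pySetD frame yv
    (PySem.List.pySetD (PySem.List.pyGetD frame yv []) xv 5)

lemma triB_eq (s t span : Int) (h : 0 < span) :
    triB s t span = (if (s + t) % (2*span) ≤ span then (s + t) % (2*span) else 2 * span - (s + t) % (2*span)) := by
  unfold triB
  rw [if_neg (by omega), PySem.Int.mod_eq_emod_of_pos (by omega : (0:Int) < 2*span)]

lemma dirF_eq (s t span : Int) (h : 0 < span) :
    dirF span s t = (if span ≤ (s + t) % (2*span) then -1 else 1) := by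
  unfold dirF
  rw [if_neg (by omega), PySem.Int.mod_eq_emod_of_pos (by omega : (0:Int) < 2*span)]

lemma emod_succ (a M : Int) (hM : 0 < M) :
    (a + 1) % M = (if a % M + 1 < M then a % M + 1 else 0) := by
  rw [← Int.emod_add_emod]
  have h1 := Int.emod_nonneg a (by omega : M ≠ 0)
  have h2 := Int.emod_lt_of_pos a hM
  split
  · exact Int.emod_eq_of_lt (by omega) (by omega)
  · have : a % M + 1 = M := by omega
    rw [this, Int.emod_self]

lemma axis_one (span s0 s' : Int) (hsp : 0 ≤ span) (h0 : 0 ≤ s0) (h1 : s0 ≤ span)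
    (hs' : 1 ≤ span → s' = min s0 (span - 1)) :
    axStep span s0 1 = (triB s' 1 span, dirF span s' 1) := by
  rcases eq_or_lt_of_le hsp with h | h
  · subst h
    unfold triB dirF axStep
    simp only [le_refl, if_pos]
    have : s0 = 0 := by omega
    subst this
    norm_num
  · have hb := hs' h
    rw [triB_eq s' 1 span h, dirF_eq s' 1 span h]
    have hm : (s' + 1) % (2*span) = s' + 1 :=
      Int.emod_eq_of_lt (by omega) (by omega)
    rw [hm]
    unfold axStep
    simp only [ge_iff_le, Prod.mk.injEq]
    constructor <;> split_ifs <;> omega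

lemma axis_step (span s' : Int) (hsp : 0 ≤ span)
    (hs' : 1 ≤ span → 0 ≤ s' ∧ s' ≤ span - 1) (t : Int) :
    axStep span (triB s' t span) (dirF span s' t) =
      (triB s' (t+1) span, dirF span s' (t+1)) := by
  rcases eq_or_lt_of_le hsp with h | h
  · subst h
    unfold triB dirF axStep
    simp only [le_refl, if_pos]
    have : (t+1) % 2 = if t % 2 = 0 then 1 else 0 := by omega
    split_ifs <;> simp_all
  · have hb := hs' h
    rw [triB_eq s' t span h, triB_eq s' (t+1) span h, dirF_eq s' t span h, dirF_eq s' (t+1) span h]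
    have h1 := Int.emod_nonneg (s' + t) (by omega : (2*span : Int) ≠ 0)
    have h2 := Int.emod_lt_of_pos (s' + t) (by omega : (0:Int) < 2*span)
    have hsucc : (s' + (t+1)) % (2*span)
        = (if (s' + t) % (2*span) + 1 < 2*span then (s' + t) % (2*span) + 1 else 0) := by
      rw [show s' + (t+1) = (s' + t) + 1 by ring, emod_succ _ _ (by omega)]
    rw [hsucc]
    unfold axStep
    simp only [ge_iff_le, Prod.mk.injEq]
    constructor <;> split_ifs <;> omega

lemma triB_bounds (s t span : Int) (hsp : 0 ≤ span) :
    0 ≤ triB s t span ∧ triB s t span ≤ span := by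
  rcases eq_or_lt_of_le hsp with h | h
  · unfold triB; rw [if_pos (by omega)]; omega
  · rw [triB_eq s t span h]
    have h1 := Int.emod_nonneg (s + t) (by omega : (2*span : Int) ≠ 0)
    have h2 := Int.emod_lt_of_pos (s + t) (by omega : (0:Int) < 2*span)
    split <;> omega

lemma pyRange_zero_map {α : Type} (n : Int) (f : Int → α) :
    (PySem.List.pyRange 0 n 1).map f = (List.range n.toNat).map (fun (k : Nat) => f (k : Int)) := by
  rw [PySem.List.pyRange_zero, List.map_map]
  rfl

lemma frame_eq (w h xv yv : Int) (hw : 1 ≤ w) (hh : 1 ≤ h)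
    (hx0 : 0 ≤ xv) (hx1 : xv ≤ w - 1) (hy0 : 0 ≤ yv) (hy1 : yv ≤ h - 1) :
    mkFrameA w h xv yv =
      (PySem.List.pyRange 0 h 1).map (fun r =>
        (PySem.List.pyRange 0 w 1).map (fun c =>
          if r = yv ∧ c = xv then 5 else 0)) := by
  have hZ : (PySem.List.pyRange 0 h 1).map (fun _ => (PySem.List.pyRange 0 w 1).map (fun _ => (0:Int)))
      = List.replicate h.toNat (List.replicate w.toNat 0) := by
    rw [pyRange_zero_map]
    simp only [List.map_const', List.length_range, PySem.List.length_pyRange_one]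
    norm_num
  unfold mkFrameA
  simp only [hZ]
  rw [pyRange_zero_map]
  have hyn : yv.toNat < h.toNat := by omega
  have hxn : xv.toNat < w.toNat := by omega
  rw [PySem.List.pyGetD_of_nonneg _ _ hy0, List.getD_replicate _ hyn,
      PySem.List.pySetD_of_nonneg _ _ hx0, PySem.List.pySetD_of_nonneg _ _ hy0]
  apply List.ext_getElem
  · simp
  · intro i hi1 hi2
    simp only [List.length_set, List.length_replicate] at hi1
    rw [List.getElem_set, List.getElem_map, List.getElem_range, pyRange_zero_map]
    split
    · -- i = yv.toNat : the ball row
      rename_i hiy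
      apply List.ext_getElem
      · simp
      · intro j hj1 hj2
        simp only [List.length_set, List.length_replicate] at hj1
        rw [List.getElem_set, List.getElem_map, List.getElem_range, List.getElem_replicate]
        split <;> split_ifs <;> omega
    · rename_i hiy
      rw [List.getElem_replicate]
      apply List.ext_getElem
      · simp
      · intro j hj1 hj2
        simp only [List.length_replicate] at hj1
        rw [List.getElem_map, List.getElem_range, List.getElem_replicate]
        split_ifs <;> omega

lemma stepA_axes (w h : Int) (l : List (List (List Int))) (x y dx dy : Int) :
    stepA w h (l, x, y, dx, dy) =
      (l ++ [mkFrameA w h (axStep (w-1) x dx).1 (axStep (h-1) y dy).1],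
       (axStep (w-1) x dx).1, (axStep (h-1) y dy).1,
       (axStep (w-1) x dx).2, (axStep (h-1) y dy).2) := by
  simp [stepA, axStep, mkFrameA, ge_iff_le]

lemma stepA_closed (w h : Int) (hw : 1 ≤ w) (hh : 1 ≤ h)
    (l : List (List (List Int))) (t : Int) :
    stepA w h (l, triB (min (PySem.Int.floordiv w 2) (w - 2)) t (w-1),
               triB 0 t (h-1),
               dirF (w-1) (min (PySem.Int.floordiv w 2) (w - 2)) t,
               dirF (h-1) 0 t)
    = (l ++ [gridB w h (min (PySem.Int.floordiv w 2) (w - 2)) (t+1)],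
       triB (min (PySem.Int.floordiv w 2) (w - 2)) (t+1) (w-1),
       triB 0 (t+1) (h-1),
       dirF (w-1) (min (PySem.Int.floordiv w 2) (w - 2)) (t+1),
       dirF (h-1) 0 (t+1)) := by
  have hw2 : PySem.Int.floordiv w 2 = w / 2 := PySem.Int.floordiv_eq_ediv_of_pos (by omega)
  have hx := axis_step (w-1) (min (PySem.Int.floordiv w 2) (w - 2)) (by omega)
    (by intro h1; rw [hw2]; constructor <;> [omega; omega]) t
  have hy := axis_step (h-1) 0 (by omega) (by intro h1; omega) t
  rw [stepA_axes, hx, hy]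
  have hbx := triB_bounds (min (PySem.Int.floordiv w 2) (w - 2)) (t+1) (w-1) (by omega)
  have hby := triB_bounds 0 (t+1) (h-1) (by omega)
  rw [frame_eq w h _ _ hw hh hbx.1 hbx.2 hby.1 hby.2]
  rfl

lemma loop_inv (w h : Int) (hw : 1 ≤ w) (hh : 1 ≤ h) (n : Nat) :
    (List.range (n+1)).foldl (fun st _ => stepA w h st)
      ([], PySem.Int.floordiv w 2, 0, 1, 1)
    = ((List.range (n+1)).map
         (fun (k : Nat) => gridB w h (min (PySem.Int.floordiv w 2) (w - 2)) ((k:Int)+1)),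
       triB (min (PySem.Int.floordiv w 2) (w - 2)) ((n:Int)+1) (w-1),
       triB 0 ((n:Int)+1) (h-1),
       dirF (w-1) (min (PySem.Int.floordiv w 2) (w - 2)) ((n:Int)+1),
       dirF (h-1) 0 ((n:Int)+1)) := by
  have hw2 : PySem.Int.floordiv w 2 = w / 2 := PySem.Int.floordiv_eq_ediv_of_pos (by omega)
  induction n with
  | zero =>
    simp only [List.range_succ, List.range_zero, List.nil_append, List.foldl_cons,
      List.foldl_nil, List.map_cons, List.map_nil]
    have hx := axis_one (w-1) (PySem.Int.floordiv w 2) (min (PySem.Int.floordiv w 2) (w - 2))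
      (by omega) (by rw [hw2]; omega) (by rw [hw2]; omega)
      (by intro h1; omega)
    have hy := axis_one (h-1) 0 0 (by omega) le_rfl (by omega) (by intro h1; omega)
    rw [stepA_axes, hx, hy]
    have hbx := triB_bounds (min (PySem.Int.floordiv w 2) (w - 2)) 1 (w-1) (by omega)
    have hby := triB_bounds 0 1 (h-1) (by omega)
    rw [frame_eq w h _ _ hw hh hbx.1 hbx.2 hby.1 hby.2]
    norm_num [gridB]
  | succ m ih =>
    rw [List.range_succ, List.foldl_append, ih, List.foldl_cons, List.foldl_nil]
    rw [stepA_closed w h hw hh _ _]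
    rw [List.range_succ, List.map_append]
    push_cast
    simp only [List.map_append, List.map_cons, List.map_nil]
    norm_num
    try ring_nf

lemma pyRange_one_shift (f : Int) :
    PySem.List.pyRange 1 (f+1) 1 = (List.range f.toNat).map (fun (k : Nat) => (k:Int)+1) := by
  rw [PySem.List.pyRange_one, show f + 1 - 1 = f by ring]
  apply List.map_congr_left
  intro k _
  omega

-- ===== VERDICT (by name: the statement is the Claim_ definition above) =====
theorem create_bouncing_ball_spec : Claim_equal_create_bouncing_ball := by
  unfold Claim_equal_create_bouncing_ball Spec_create_bouncing_ball
  intro w h f _ hpre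
  unfold Pre_create_bouncing_ball at hpre
  unfold create_bouncing_ball create_bouncing_ball_alt
  rcases (by omega : f ≤ 0 ∨ 0 < f) with hf | hf
  · rw [PySem.List.pyRange_one_eq_nil hf,
        PySem.List.pyRange_one_eq_nil (show f + 1 ≤ 1 by omega)]
    simp
  · obtain ⟨hw, hh⟩ : 1 ≤ w ∧ 1 ≤ h := by rcases hpre with h1 | h1; omega; exact h1
    rw [PySem.List.pyRange_zero, List.foldl_map, pyRange_one_shift, List.map_map]
    obtain ⟨m, hm⟩ : ∃ m, f.toNat = m + 1 := ⟨f.toNat - 1, by omega⟩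
    rw [hm, loop_inv w h hw hh m]
    apply List.map_congr_left
    intro k hk
    simp only [Function.comp_apply, gridB]
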